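-- pv_equiv track=rewrite | github.com/trentm/cmdln | test/test_cmdln.py | parse_expect_content
-- ===== SOURCE A (Python) =====
-- SHELL_PROMPT = "$ "
--
-- def strip_prefix(line, prefix):
--     junk, content = line[:len(prefix)], line[len(prefix):].rstrip()
--     if junk.strip(): # line in block with short indentation
--         raise ValueError("too-short indentation on line: '%s'"
--                          % line)
--     assert '\t' not in junk, \
--            "error: tab in expect-line prefix: '%s'" % line
--     return content
--
-- def parse_expect_content(content):
--     """Generate parsed "expect" lines.
--
--     "Expect" blocks begin with a "spawn" line -- one that is prefixed
--     with a shell prompt -- and end with a blank line or the end of the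
--     content. A "parsed" line is one with the indentation removed, if
--     any.
--
--     Generates 2-tuples
--         (<line-type>, <parsed-line>)
--     where <line-type> is "spawn" for spawn-lines or "other" for other
--     lines.
--     """
--     if not content:
--         raise StopIteration
--     prefix = None
--     for line in content.splitlines(0):
--         if not line.strip():
--             prefix = None # end of a block
--         elif line.lstrip().startswith(SHELL_PROMPT):
--             if prefix is None: # start of a new block
--                 idx = line.index(SHELL_PROMPT)
--                 prefix, content = line[:idx], line[idx:].rstrip()
--                 assert '\t' not in prefix, \
--                        "error: tab in expect-line prefix: '%s'" % line
--             else: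
--                 content = strip_prefix(line, prefix)
--             yield "spawn", content
--         elif prefix is not None:
--             yield "other", strip_prefix(line, prefix)
-- ===== SOURCE B (Python) =====
-- SHELL_PROMPT = "$ "
--
-- def parse_expect_content(content):
--     """Blocks-first reimplementation: split the lines into blank-line-separated
--     blocks, then parse each block on its own (the block's first spawn line
--     fixes the indentation prefix)."""
--     # split into maximal runs of non-blank lines
--     blocks = []
--     cur = []
--     for line in content.splitlines(0):
--         if not line.strip():
--             if cur:
--                 blocks.append(cur)
--             cur = []
--         else:
--             cur.append(line)
--     if cur:
--         blocks.append(cur)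
--     out = []
--     for block in blocks:
--         # drop leading non-spawn lines; a block without a spawn line yields nothing
--         while block and not block[0].lstrip().startswith(SHELL_PROMPT):
--             block = block[1:]
--         if not block:
--             continue
--         first, tail = block[0], block[1:]
--         idx = first.index(SHELL_PROMPT)
--         prefix = first[:idx]
--         assert '\t' not in prefix, \
--                "error: tab in expect-line prefix: '%s'" % first
--         out.append(("spawn", first[idx:].rstrip()))
--         n = len(prefix)
--         for line in tail:
--             junk, rest = line[:n], line[n:].rstrip()
--             if junk.strip():
--                 raise ValueError("too-short indentation on line: '%s'" % line)
--             assert '\t' not in junk, \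
--                    "error: tab in expect-line prefix: '%s'" % line
--             tag = "spawn" if line.lstrip().startswith(SHELL_PROMPT) else "other"
--             out.append((tag, rest))
--     return out
-- ===== Notes on version B (the rewrite author's own statement) =====
-- stated objective: alternative
-- what changed: B first splits the lines into blank-line-separated blocks and then parses each block independently (finding the block's first spawn line and checking the rest against its prefix), instead of A's single pass that threads an Optional prefix state through all lines.
-- crash fix: On empty content the StopIteration that A raises inside the generator surfaces as RuntimeError (PEP 479) when the generator is consumed; B returns []. — e.g. on parse_expect_content(""): A raises RuntimeError, B returns []
import Mathlib
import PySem

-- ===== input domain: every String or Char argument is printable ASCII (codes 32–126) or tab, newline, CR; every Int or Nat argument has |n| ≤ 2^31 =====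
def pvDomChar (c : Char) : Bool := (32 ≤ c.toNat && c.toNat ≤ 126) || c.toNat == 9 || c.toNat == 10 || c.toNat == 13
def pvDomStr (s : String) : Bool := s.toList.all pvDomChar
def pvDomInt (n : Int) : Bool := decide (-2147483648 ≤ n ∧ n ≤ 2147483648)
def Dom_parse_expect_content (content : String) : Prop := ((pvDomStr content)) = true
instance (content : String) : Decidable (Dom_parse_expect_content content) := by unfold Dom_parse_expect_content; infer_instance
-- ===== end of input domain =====

-- B re-implements parse_expect_content blocks-first (group the lines into blank-separated blocks,
-- then parse each block around its first spawn line) instead of A's one-pass prefix-state machine;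
-- objective: alternative decomposition, same cost. A is a generator; equivalence is about the
-- list of yielded pairs. A raises RuntimeError on "" (PEP 479); B returns [] there (Raises_ block).


-- ===== PORT A =====
-- strip_prefix: none = the ValueError / failed assert (A raises there; such inputs are outside Pre_)
def pvStripPrefix (line prefix_ : String) : Option String :=
  let junk := PySem.Str.slice line none (some (PySem.Str.len prefix_))
  let cont := PySem.Str.rstrip (PySem.Str.slice line (some (PySem.Str.len prefix_)) none)
  if PySem.Str.strip junk ≠ "" then none
  else if PySem.Str.isIn "\t" junk then none
  else some cont

-- the generator's for-loop over splitlines, state = the current prefix (None = outside a block);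
-- where A raises mid-iteration the port stops and returns the items yielded so far
def pvALoop : List String → Option String → List (String × String)
  | [], _ => []
  | line :: rest, pfx =>
    if PySem.Str.strip line = "" then pvALoop rest none
    else if PySem.Str.startswith (PySem.Str.lstrip line) "$ " then
      match pfx with
      | none =>
        let idx : Int := PySem.Str.find line "$ "
        let p := PySem.Str.slice line none (some idx)
        let c := PySem.Str.rstrip (PySem.Str.slice line (some idx) none)
        if PySem.Str.isIn "\t" p then []    -- failed assert: A raises
        else ("spawn", c) :: pvALoop rest (some p)
      | some p =>
        match pvStripPrefix line p with
        | none => []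
        | some c => ("spawn", c) :: pvALoop rest (some p)
    else
      match pfx with
      | some p =>
        match pvStripPrefix line p with
        | none => []
        | some c => ("other", c) :: pvALoop rest (some p)
      | none => pvALoop rest none

def parse_expect_content (content : String) : List (String × String) :=
  if content = "" then []   -- A raises StopIteration (→ RuntimeError, PEP 479) here; outside Pre_
  else pvALoop (PySem.Str.splitlines content) none

-- ===== PORT B =====
-- group the lines into maximal runs of non-blank lines (cur = the run being collected)
def pvBlocksAux : List String → List String → List (List String)
  | [], cur => if cur = [] then [] else [cur]
  | l :: rest, cur =>
    if PySem.Str.strip l = "" then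
      if cur = [] then pvBlocksAux rest [] else cur :: pvBlocksAux rest []
    else pvBlocksAux rest (cur ++ [l])

-- the lines of a block after its first spawn line, checked against the block's prefix;
-- where Source B raises the port stops and returns the items collected so far
def pvBTail : List String → String → List (String × String)
  | [], _ => []
  | line :: rest, p =>
    let junk := PySem.Str.slice line none (some (PySem.Str.len p))
    let r := PySem.Str.rstrip (PySem.Str.slice line (some (PySem.Str.len p)) none)
    if PySem.Str.strip junk ≠ "" then []     -- ValueError
    else if PySem.Str.isIn "\t" junk then [] -- failed assert
    else (if PySem.Str.startswith (PySem.Str.lstrip line) "$ " then "spawn" else "other", r)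
         :: pvBTail rest p

def pvBBlock (block : List String) : List (String × String) :=
  match block.dropWhile (fun l => !(PySem.Str.startswith (PySem.Str.lstrip l) "$ ")) with
  | [] => []
  | first :: tail =>
    let idx : Int := PySem.Str.find first "$ "
    let p := PySem.Str.slice first none (some idx)
    if PySem.Str.isIn "\t" p then []         -- failed assert
    else ("spawn", PySem.Str.rstrip (PySem.Str.slice first (some idx) none)) :: pvBTail tail p

def parse_expect_content_alt (content : String) : List (String × String) :=
  (pvBlocksAux (PySem.Str.splitlines content) []).flatMap pvBBlock

-- ===== PRECONDITION & SPEC =====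
-- a block is fine iff its first spawn line's leading whitespace is tab-free and every later line
-- of the block starts with that many tab-free whitespace characters
def pvBlockOK (b : List String) : Bool :=
  match b.dropWhile (fun l => !(PySem.Str.startswith (PySem.Str.lstrip l) "$ ")) with
  | [] => true
  | first :: tail =>
    let p := first.toList.takeWhile PySem.Str.isspace
    ('\t' ∉ p : Bool) &&
    tail.all (fun l => (l.toList.take p.length).all (fun c => PySem.Str.isspace c && c ≠ '\t'))

-- Pre_ excludes the empty string (A raises StopIteration there, surfacing as RuntimeError under PEP 479)
-- and the inputs where A raises ValueError / AssertionError: a block line indented with less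
-- (or non-space) leading text than the block's first spawn line, or a tab in that indentation.
def Pre_parse_expect_content (content : String) : Prop :=
  content ≠ "" ∧
  ∀ b ∈ ((PySem.Str.splitlines content).splitOnP (fun l => PySem.Str.strip l == "")).filter
          (fun b => !b.isEmpty),
    pvBlockOK b = true
instance (content : String) : Decidable (Pre_parse_expect_content content) := by
  unfold Pre_parse_expect_content; infer_instance

def pvWitness_parse_expect_content : String := "$ ls\n  foo  \n\nx\n  $ pwd\n  /tmp"

-- A raises RuntimeError (its StopIteration surfaces as RuntimeError, PEP 479) on the empty string; B returns [].
def Raises_parse_expect_content (content : String) : Prop := content = ""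
instance (content : String) : Decidable (Raises_parse_expect_content content) := by
  unfold Raises_parse_expect_content; infer_instance
def pvRaiseWitness_parse_expect_content : String := ""
def pvRaiseWitnessOut_parse_expect_content : List (String × String) := []

def Spec_parse_expect_content (content : String) (out : List (String × String)) : Prop :=
  out = parse_expect_content_alt content
instance (content : String) (out : List (String × String)) : Decidable (Spec_parse_expect_content content out) := by
  unfold Spec_parse_expect_content; infer_instance

-- ===== CLAIM (what is proved, stated in full; the proofs are below) =====
def Claim_equal_parse_expect_content : Prop :=
  ∀ (content : String), Dom_parse_expect_content content → Pre_parse_expect_content content →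
    Spec_parse_expect_content content (parse_expect_content content)

def Claim_raises_parse_expect_content : Prop :=
  (∀ (content : String), Dom_parse_expect_content content → Raises_parse_expect_content content →
      ¬ Pre_parse_expect_content content) ∧
  (Dom_parse_expect_content (pvRaiseWitness_parse_expect_content) ∧
   Raises_parse_expect_content (pvRaiseWitness_parse_expect_content) ∧
   parse_expect_content_alt (pvRaiseWitness_parse_expect_content) = pvRaiseWitnessOut_parse_expect_content)

-- ===== LEMMAS AND PROOFS =====

def pvNB (x : String) : Bool := !decide (PySem.Str.strip x = "")

def pvSP (x : String) : Bool := PySem.Str.startswith (PySem.Str.lstrip x) "$ "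

theorem pvAux_cons (lines : List String) (cur : List String) (h : cur ≠ []) :
    pvBlocksAux lines cur =
      (cur ++ lines.takeWhile pvNB) :: pvBlocksAux ((lines.dropWhile pvNB).drop 1) [] := by
  induction lines generalizing cur with
  | nil => simp [pvBlocksAux, h]
  | cons l rest ih =>
    by_cases hb : PySem.Str.strip l = ""
    · simp only [pvBlocksAux, hb, List.takeWhile_cons, List.dropWhile_cons, pvNB, if_true,
        decide_true, Bool.not_true, if_neg h]
      simp
    · simp only [pvBlocksAux, hb, if_false, List.takeWhile_cons, List.dropWhile_cons, pvNB]
      rw [ih (cur ++ [l]) (by simp)]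
      simp

theorem pvAux_nil_step (lines : List String) :
    pvBlocksAux lines [] =
      (match lines.takeWhile pvNB with
       | [] => ([] : List (List String))
       | b => [b]) ++ pvBlocksAux ((lines.dropWhile pvNB).drop 1) [] := by
  cases lines with
  | nil => simp [pvBlocksAux]
  | cons l rest =>
    by_cases hb : PySem.Str.strip l = ""
    · simp [pvBlocksAux, hb, pvNB]
    · simp only [pvBlocksAux, hb, if_false, List.takeWhile_cons, List.dropWhile_cons, pvNB]
      simp only [List.nil_append]
      rw [pvAux_cons rest [l] (by simp)]
      simp

theorem pvF (lines : List String) :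
    (pvBlocksAux lines []).flatMap pvBBlock =
      pvBBlock (lines.takeWhile pvNB) ++
      ((pvBlocksAux ((lines.dropWhile pvNB).drop 1) []).flatMap pvBBlock) := by
  rw [pvAux_nil_step lines]
  cases htw : lines.takeWhile pvNB with
  | nil => simp [pvBBlock]
  | cons b bs => simp

theorem pvNoTab (s : String) (h : '\t' ∉ s.toList) : PySem.Str.isIn "\t" s = false := by
  rw [← Bool.not_eq_true, PySem.Str.isIn_iff_infix]
  intro hinf
  exact h ((List.singleton_infix_iff _ _).mp hinf)

theorem pvJunkOK (l : String) (n : Nat)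
    (h : ∀ c ∈ l.toList.take n, PySem.Str.isspace c = true ∧ c ≠ '\t') :
    PySem.Str.strip (PySem.Str.slice l none (some (n:Int))) = "" ∧
    PySem.Str.isIn "\t" (PySem.Str.slice l none (some (n:Int))) = false := by
  have htl : (PySem.Str.slice l none (some (n:Int))).toList = l.toList.take n := by
    simp [PySem.Str.toList_slice, PySem.Chars.slice_eq_listSlice, PySem.List.slice_to_natCast]
  constructor
  · rw [← String.toList_eq_nil_iff, PySem.Str.toList_strip, htl]
    simp [PySem.Chars.strip, PySem.Chars.lstrip, PySem.Chars.rstrip]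
    intro x hx
    exact (h x ((List.dropWhile_sublist _).subset hx)).1
  · apply pvNoTab
    rw [htl]
    intro hmem
    exact (h _ hmem).2 rfl

theorem pvPrefixToList (l : String) (hsp : pvSP l = true) :
    (PySem.Str.slice l none (some (PySem.Str.find l "$ "))).toList =
      l.toList.takeWhile PySem.Str.isspace := by
  have hpre : ['$', ' '] <+: l.toList.dropWhile PySem.Str.isspace := by
    have := hsp
    unfold pvSP at this
    rw [PySem.Str.startswith_eq] at this
    rw [PySem.Chars.startswith_iff] at this
    simpa [PySem.Str.toList_lstrip, PySem.Chars.lstrip] using this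
  set L := l.toList with hL
  set w := (L.takeWhile PySem.Str.isspace).length with hw
  have hdw : L.dropWhile PySem.Str.isspace = L.drop w := by
    have h0 : L.takeWhile PySem.Str.isspace ++ L.dropWhile PySem.Str.isspace = L :=
      List.takeWhile_append_dropWhile
    have h1 : (L.takeWhile PySem.Str.isspace ++ L.dropWhile PySem.Str.isspace).drop w = L.drop w := by
      rw [h0]
    rw [← h1, hw, List.drop_left]
  have hwlen : w ≤ L.length := by
    rw [hw]; exact (List.takeWhile_prefix _).length_le
  have hfind : PySem.Str.find l "$ " = (w : Int) := by
    rw [PySem.Str.find_eq]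
    have hsub : ("$ ".toList : List Char) = ['$', ' '] := by decide
    have hnn : 0 ≤ PySem.Chars.find L "$ ".toList := by
      rw [PySem.Chars.find_nonneg_iff, hsub]
      rw [← PySem.Chars.isIn_iff_infix, ← PySem.Chars.exists_prefix_drop_iff_isIn]
      exact ⟨w, by rw [← hdw]; exact hpre⟩
    obtain ⟨h1, h2⟩ := PySem.Chars.find_spec hnn
    set t := (PySem.Chars.find L "$ ".toList).toNat with ht
    have htw : t = w := by
      rcases Nat.lt_trichotomy t w with hlt | heq | hgt
      · -- t < w: L[t] = '$' but isspace
        exfalso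
        rw [hsub] at h1
        obtain ⟨r, hr⟩ := h1
        have htL : t < L.length := lt_of_lt_of_le hlt hwlen
        have hget : L[t]? = some '$' := by
          have : (List.drop t L)[0]? = L[t]? := by simp [List.getElem?_drop]
          rw [← this, ← hr]
          rfl
        have hsp' : PySem.Str.isspace (L[t]'htL) = true := by
          have hmem : (L.takeWhile PySem.Str.isspace)[t]'(by rw [← hw] at *; omega) ∈
              L.takeWhile PySem.Str.isspace := List.getElem_mem _
          have := List.mem_takeWhile_imp hmem
          rwa [List.IsPrefix.getElem (List.takeWhile_prefix _)] at this
        have : L[t]'htL = '$' := by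
          have := List.getElem?_eq_getElem htL
          rw [hget] at this
          exact (Option.some_injective _ this.symm)
        rw [this] at hsp'
        exact absurd hsp' (by decide)
      · exact heq
      · -- w < t contradicts minimality
        exfalso
        exact h2 w hgt (by rw [hsub, ← hdw]; exact hpre)
    have h3 := Int.toNat_of_nonneg hnn
    rw [← h3, ht] at *
    omega
  rw [hfind]
  have hsl : (PySem.Str.slice l none (some (w:Int))).toList = L.take w := by
    simp [PySem.Str.toList_slice, PySem.Chars.slice_eq_listSlice, PySem.List.slice_to_natCast, hL]
  rw [hsl]
  exact ((List.prefix_iff_eq_take).mp (List.takeWhile_prefix _)).symm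

theorem pvLen (s : String) : PySem.Str.len s = (s.toList.length : Int) := by
  simp [PySem.Str.len_eq]

theorem pvStripPrefix_ok (l p : String)
    (h : ∀ c ∈ l.toList.take p.toList.length, PySem.Str.isspace c = true ∧ c ≠ '\t') :
    pvStripPrefix l p =
      some (PySem.Str.rstrip (PySem.Str.slice l (some (PySem.Str.len p)) none)) := by
  obtain ⟨h1, h2⟩ := pvJunkOK l p.toList.length h
  unfold pvStripPrefix
  rw [pvLen]
  simp at h1 h2
  simp [h1, h2]

theorem pvS (lines : List String) (p : String)
    (hp : ∀ l ∈ lines.takeWhile pvNB,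
       ∀ c ∈ l.toList.take p.toList.length, PySem.Str.isspace c = true ∧ c ≠ '\t') :
    pvALoop lines (some p) =
      pvBTail (lines.takeWhile pvNB) p ++ pvALoop (lines.dropWhile pvNB) none := by
  induction lines with
  | nil => simp [pvALoop, pvBTail]
  | cons l rest ih =>
    by_cases hb : PySem.Str.strip l = ""
    · simp only [pvALoop, hb, if_true, List.takeWhile_cons, List.dropWhile_cons, pvNB,
        decide_true, Bool.not_true]
      simp [pvBTail, pvALoop, hb]
    · have hmem : l ∈ (l :: rest).takeWhile pvNB := by
        rw [List.takeWhile_cons]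
        simp [pvNB, hb]
      have hline := hp l hmem
      have hsome := pvStripPrefix_ok l p hline
      obtain ⟨h1, h2⟩ := pvJunkOK l p.toList.length hline
      have htw : (l :: rest).takeWhile pvNB = l :: rest.takeWhile pvNB := by
        rw [List.takeWhile_cons]; simp [pvNB, hb]
      have hdw : (l :: rest).dropWhile pvNB = rest.dropWhile pvNB := by
        rw [List.dropWhile_cons]; simp [pvNB, hb]
      have hrec := ih (fun x hx => hp x (by rw [htw]; exact List.mem_cons_of_mem _ hx))
      rw [htw, hdw]
      by_cases hspn : PySem.Str.startswith (PySem.Str.lstrip l) "$ " = true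
      all_goals (
        simp only [pvALoop, hb, if_false, hspn, if_true, hsome, pvBTail, pvLen, hrec]
        split_ifs with hc1 hc2 <;> simp_all)

theorem pvBlockOK_cons (l : String) (b : List String)
    (h : PySem.Str.startswith (PySem.Str.lstrip l) "$ " = false) :
    pvBlockOK (l :: b) = pvBlockOK b := by
  simp at h
  simp [pvBlockOK, h]

theorem pvBBlock_cons (l : String) (b : List String)
    (h : PySem.Str.startswith (PySem.Str.lstrip l) "$ " = false) :
    pvBBlock (l :: b) = pvBBlock b := by
  simp at h
  simp [pvBBlock, h]

theorem pvMainAux : ∀ (n : Nat) (lines : List String), lines.length ≤ n →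
    (∀ b ∈ pvBlocksAux lines [], pvBlockOK b = true) →
    pvALoop lines none =
      pvBBlock (lines.takeWhile pvNB) ++
      ((pvBlocksAux ((lines.dropWhile pvNB).drop 1) []).flatMap pvBBlock) := by
  intro n
  induction n with
  | zero =>
    intro lines hl _
    have : lines = [] := List.length_eq_zero_iff.mp (Nat.le_zero.mp hl)
    subst this
    simp [pvALoop, pvBBlock, pvBlocksAux]
  | succ n ih =>
    intro lines hl h
    cases lines with
    | nil => simp [pvALoop, pvBBlock, pvBlocksAux]
    | cons l rest =>
      have hrl : rest.length ≤ n := by simpa using hl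
      by_cases hb : PySem.Str.strip l = ""
      · have hA2 : pvBlocksAux (l :: rest) [] = pvBlocksAux rest [] := by
          simp [pvBlocksAux, hb]
        have htw : (l :: rest).takeWhile pvNB = [] := by simp [pvNB, hb]
        have hdw : (l :: rest).dropWhile pvNB = l :: rest := by simp [pvNB, hb]
        rw [htw, hdw]
        have hL : pvALoop (l :: rest) none = pvALoop rest none := by simp [pvALoop, hb]
        rw [hL, ih rest hrl (fun b hb' => h b (by rw [hA2]; exact hb')), ← pvF rest]
        simp [pvBBlock]
      · have hA : pvBlocksAux (l :: rest) [] =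
            (l :: rest.takeWhile pvNB) :: pvBlocksAux ((rest.dropWhile pvNB).drop 1) [] := by
          simp only [pvBlocksAux, hb, if_false]
          simp only [List.nil_append]
          rw [pvAux_cons rest [l] (by simp)]
          simp
        have hOK0 : pvBlockOK (l :: rest.takeWhile pvNB) = true :=
          h _ (by rw [hA]; exact List.mem_cons_self)
        have hrest : ∀ b ∈ pvBlocksAux ((rest.dropWhile pvNB).drop 1) [], pvBlockOK b = true :=
          fun b hb' => h b (by rw [hA]; exact List.mem_cons_of_mem _ hb')
        have htw : (l :: rest).takeWhile pvNB = l :: rest.takeWhile pvNB := by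
          simp [pvNB, hb]
        have hdw : (l :: rest).dropWhile pvNB = rest.dropWhile pvNB := by
          simp [pvNB, hb]
        rw [htw, hdw]
        -- common fact: pvALoop (rest.dropWhile pvNB) none = flatMap over later blocks
        have hafter : pvALoop (rest.dropWhile pvNB) none =
            (pvBlocksAux ((rest.dropWhile pvNB).drop 1) []).flatMap pvBBlock := by
          cases hdd : rest.dropWhile pvNB with
          | nil => simp [pvALoop, pvBlocksAux]
          | cons d ds =>
            have hdb : PySem.Str.strip d = "" := by
              have := List.head_dropWhile_not (p := pvNB) (l := rest)
              rw [hdd] at this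
              simpa [pvNB] using this
            have hLd : pvALoop (d :: ds) none = pvALoop ds none := by simp [pvALoop, hdb]
            have hds : ds.length ≤ n := by
              have h1 : (rest.dropWhile pvNB).length ≤ rest.length := List.length_dropWhile_le _ _
              rw [hdd] at h1
              simp at h1
              omega
            have hh : ∀ b ∈ pvBlocksAux ds [], pvBlockOK b = true := by
              intro b hb'
              apply hrest
              rw [hdd]
              simpa using hb'
            rw [hLd, ih ds hds hh, ← pvF ds]
            simp
        by_cases hspn : PySem.Str.startswith (PySem.Str.lstrip l) "$ " = true
        · -- spawn head
          have hOK : pvBlockOK (l :: rest.takeWhile pvNB) = true := hOK0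
          rw [pvBlockOK] at hOK
          rw [List.dropWhile_cons] at hOK
          simp only [hspn, Bool.not_true, Bool.false_eq_true, if_false] at hOK
          rw [Bool.and_eq_true] at hOK
          obtain ⟨hOKtab, hOKlines⟩ := hOK
          have hptl := pvPrefixToList l (by simpa [pvSP] using hspn)
          have htab : PySem.Str.isIn "\t" (PySem.Str.slice l none (some (PySem.Str.find l "$ "))) = false := by
            apply pvNoTab
            rw [hptl]
            simpa using hOKtab
          have hp' : ∀ x ∈ rest.takeWhile pvNB,
              ∀ c ∈ x.toList.take (PySem.Str.slice l none (some (PySem.Str.find l "$ "))).toList.length,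
                PySem.Str.isspace c = true ∧ c ≠ '\t' := by
            intro x hx c hc
            rw [hptl] at hc
            rw [List.all_eq_true] at hOKlines
            have := hOKlines x hx
            rw [List.all_eq_true] at this
            have := this c hc
            rw [Bool.and_eq_true] at this
            exact ⟨this.1, by simpa using this.2⟩
          have hspnC : PySem.Chars.startswith (PySem.Chars.lstrip l.toList) ['$', ' '] = true := by
            simpa using hspn
          have htabC : PySem.Chars.isIn ['\t']
              (PySem.List.slice l.toList none (some (PySem.Chars.find l.toList ['$', ' ']))) = false := by
            simpa using htab
          have hLHS : pvALoop (l :: rest) none =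
              ("spawn", PySem.Str.rstrip (PySem.Str.slice l (some (PySem.Str.find l "$ ")) none)) ::
                pvALoop rest (some (PySem.Str.slice l none (some (PySem.Str.find l "$ ")))) := by
            simp [pvALoop, hb, hspnC, htabC]
          rw [hLHS, pvS rest _ hp', hafter]
          have hRHS : pvBBlock (l :: rest.takeWhile pvNB) =
              ("spawn", PySem.Str.rstrip (PySem.Str.slice l (some (PySem.Str.find l "$ ")) none)) ::
                pvBTail (rest.takeWhile pvNB) (PySem.Str.slice l none (some (PySem.Str.find l "$ "))) := by
            rw [pvBBlock]
            rw [List.dropWhile_cons]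
            simp only [hspn, Bool.not_true, Bool.false_eq_true, if_false]
            simp [htabC]
          rw [hRHS]
          simp
        · -- non-spawn head
          have hspn' : PySem.Str.startswith (PySem.Str.lstrip l) "$ " = false := by
            simpa using hspn
          have hspnC' : PySem.Chars.startswith (PySem.Chars.lstrip l.toList) ['$', ' '] = false := by
            simpa using hspn'
          have hL : pvALoop (l :: rest) none = pvALoop rest none := by
            simp [pvALoop, hb, hspnC']
          have hstep : ∀ b ∈ pvBlocksAux rest [], pvBlockOK b = true := by
            intro b hb'
            rw [pvAux_nil_step rest] at hb'
            rcases List.mem_append.mp hb' with hmem | hmem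
            · cases hcase : rest.takeWhile pvNB with
              | nil => rw [hcase] at hmem; simp at hmem
              | cons t ts =>
                rw [hcase] at hmem
                simp at hmem
                subst hmem
                rw [← hcase]
                rw [← pvBlockOK_cons l _ hspn']
                exact hOK0
            · exact hrest b hmem
          rw [hL, ih rest hrl hstep, pvBBlock_cons l _ hspn']



theorem pvSplit_cur (lines : List String) : ∀ cur, pvBlocksAux lines cur =
    (((lines.splitOnP (fun l => PySem.Str.strip l == "")).modifyHead (cur ++ ·)).filter
      (fun b => !b.isEmpty)) := by
  induction lines with
  | nil =>
    intro cur
    by_cases h : cur = [] <;> simp [pvBlocksAux, List.splitOnP_nil, h]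
  | cons l rest ih =>
    intro cur
    rw [List.splitOnP_cons]
    by_cases hb : PySem.Str.strip l = ""
    · have hmod : (List.modifyHead (cur ++ ·) ([] :: rest.splitOnP (fun l => PySem.Str.strip l == "")))
          = cur :: rest.splitOnP (fun l => PySem.Str.strip l == "") := by
        simp
      have hid : List.modifyHead (fun x : List String => x)
          (rest.splitOnP (fun l => PySem.Str.strip l == "")) =
          rest.splitOnP (fun l => PySem.Str.strip l == "") := by
        rw [show (fun x : List String => x) = id by rfl, List.modifyHead_id, id]
      by_cases hc : cur = [] <;>
        simp [pvBlocksAux, hb, hc, hmod, ih [], hid]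
    · have hcomp : (fun x => cur ++ (l :: x)) = (fun x => (cur ++ [l]) ++ x) := by
        funext x; simp
      simp only [pvBlocksAux, hb, if_false, beq_iff_eq]
      rw [List.modifyHead_modifyHead]
      rw [show ((cur ++ ·) ∘ (List.cons l)) = ((cur ++ [l]) ++ ·) by funext x; simp]
      exact ih (cur ++ [l])

theorem parse_expect_content_spec : Claim_equal_parse_expect_content := by
  intro content _ hpre
  unfold Spec_parse_expect_content parse_expect_content parse_expect_content_alt
  rw [if_neg hpre.1]
  have h : ∀ b ∈ pvBlocksAux (PySem.Str.splitlines content) [], pvBlockOK b = true := by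
    intro b hbmem
    apply hpre.2
    rw [pvSplit_cur _ []] at hbmem
    rw [show (fun x : List String => [] ++ x) = id by funext x; rfl, List.modifyHead_id] at hbmem
    simpa using hbmem
  rw [pvMainAux (PySem.Str.splitlines content).length _ le_rfl h, ← pvF]

@[simp] theorem parse_expect_content_raises : Claim_raises_parse_expect_content := by
  unfold Claim_raises_parse_expect_content
  exact ⟨fun c _ hr hp => hp.1 hr, by decide⟩
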